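-- pv_equiv track=rewrite | github.com/GozdeDogan/decentNumber | decentNumber_131044019.py | decentNumber
-- ===== SOURCE A (Python) =====
-- def decentNumber(n):
--     countOfThrees = 0
--     countOfFives  = 0
--     remainder = n
--
--     while remainder > 2:
--         if remainder % 3 == 0:
--             countOfFives = remainder
--             break
--
--         remainder -= 5
--
--     countOfThrees = n - countOfFives
--     if remainder < 0 or countOfThrees % 5:
--         return "-1"
--
--     return '5'*countOfFives + '3'*countOfThrees
-- ===== SOURCE B (Python) =====
-- def decentNumber(n):
--     if n < 0:
--         return "-1"
--     r = n % 3
--     if r == 0: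
--         c3 = 0
--     elif r == 1:
--         c3 = 10
--     else:
--         c3 = 5
--     if c3 > n:
--         return "-1"
--     return '5' * (n - c3) + '3' * c3
-- ===== Notes on version B (the rewrite author's own statement) =====
-- stated objective: simpler
-- what changed: Replaces A's descending subtract-by-5 while loop over the count of fives by a direct arithmetic case analysis on n % 3 (threes count is 0, 10 or 5), with an explicit n < 0 guard.
import Mathlib
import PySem

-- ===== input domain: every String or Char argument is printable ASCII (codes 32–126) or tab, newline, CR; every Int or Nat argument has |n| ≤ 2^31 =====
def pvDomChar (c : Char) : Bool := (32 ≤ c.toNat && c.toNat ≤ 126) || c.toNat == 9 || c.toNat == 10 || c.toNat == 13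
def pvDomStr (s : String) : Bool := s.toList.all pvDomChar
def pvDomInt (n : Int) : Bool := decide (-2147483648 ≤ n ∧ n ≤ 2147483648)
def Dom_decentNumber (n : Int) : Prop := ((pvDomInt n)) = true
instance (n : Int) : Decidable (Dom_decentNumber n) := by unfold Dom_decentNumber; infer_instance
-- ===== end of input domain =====

-- B replaces A's descending subtract-by-5 while loop by a direct case analysis on n % 3; objective: simpler.


-- ===== PORT A =====
-- A's while loop: returns (countOfFives, final remainder)
def pvALoop (remainder : Int) : Int × Int :=
  if remainder > 2 then
    if PySem.Int.mod remainder 3 == 0 then (remainder, remainder)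
    else pvALoop (remainder - 5)
  else (0, remainder)
termination_by remainder.toNat
decreasing_by omega

def decentNumber (n : Int) : String :=
  let p := pvALoop n
  let countOfFives := p.1
  let remainder := p.2
  let countOfThrees := n - countOfFives
  if remainder < 0 || !(PySem.Int.mod countOfThrees 5 == 0) then "-1"
  else String.mk (PySem.List.pyRepeat ['5'] countOfFives ++ PySem.List.pyRepeat ['3'] countOfThrees)

-- ===== PORT B =====
def decentNumber_alt (n : Int) : String :=
  if n < 0 then "-1"
  else
    let r := PySem.Int.mod n 3
    let c3 : Int := if r == 0 then 0 else if r == 1 then 10 else 5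
    if c3 > n then "-1"
    else String.mk (PySem.List.pyRepeat ['5'] (n - c3) ++ PySem.List.pyRepeat ['3'] c3)

-- ===== PRECONDITION & SPEC =====
def Spec_decentNumber (n : Int) (out : String) : Prop := out = decentNumber_alt n
instance (n : Int) (out : String) : Decidable (Spec_decentNumber n out) := by unfold Spec_decentNumber; infer_instance

-- ===== CLAIM (what is proved, stated in full; the proofs are below) =====
def Claim_equal_decentNumber : Prop := ∀ (n : Int), Dom_decentNumber n → Spec_decentNumber n (decentNumber n)

-- ===== LEMMAS AND PROOFS =====

theorem pvALoop_le (r : Int) (h : ¬ r > 2) : pvALoop r = (0, r) := by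
  rw [pvALoop]; simp [h]

theorem pvMod3_eq (n : Int) : PySem.Int.mod n 3 = n % 3 := by
  simp [PySem.Int.mod, Int.fmod_eq_emod]

theorem pvALoop_div (r : Int) (h : r > 2) (h3 : r % 3 = 0) : pvALoop r = (r, r) := by
  rw [pvALoop]
  simp only [pvMod3_eq, if_pos h]
  simp [h3]

theorem pvALoop_step (r : Int) (h : r > 2) (h3 : r % 3 ≠ 0) : pvALoop r = pvALoop (r - 5) := by
  rw [pvALoop]
  simp only [pvMod3_eq, if_pos h]
  simp [h3]

-- ===== VERDICT (by name: the statement is the Claim_ definition above) =====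
theorem decentNumber_spec : Claim_equal_decentNumber := by
  intro n _
  unfold Spec_decentNumber decentNumber decentNumber_alt
  have hm3 : n % 3 = 0 ∨ n % 3 = 1 ∨ n % 3 = 2 := by omega
  by_cases hneg : n < 0
  · -- loop never runs, remainder = n < 0
    rw [pvALoop_le n (by omega)]
    simp [hneg]
  · rcases hm3 with h3 | h3 | h3
    · -- n % 3 = 0 : answer is all fives
      by_cases h2 : n > 2
      · rw [pvALoop_div n h2 h3]
        simp [hneg, h3]
      · -- n = 0 (since 0 ≤ n ≤ 2 and n % 3 = 0)
        have h0 : n = 0 := by omega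
        subst h0
        rw [pvALoop_le 0 (by norm_num)]
        decide
    · -- n % 3 = 1 : threes count 10 when n ≥ 10
      by_cases h10 : n ≥ 10
      · by_cases h13 : n ≥ 13
        · rw [pvALoop_step n (by omega) (by omega),
              pvALoop_step (n - 5) (by omega) (by omega),
              pvALoop_div (n - 5 - 5) (by omega) (by omega)]
          have e3 : n - 5 - 5 = n - 10 := by omega
          rw [e3]
          have e1 : n - (n - 10) = 10 := by omega
          simp [h3, e1, hneg,
                (show ¬ (n - 10 : Int) < 0 by omega), (show ¬ (10 : Int) > n by omega)]
        · have h10' : n = 10 := by omega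
          subst h10'
          rw [pvALoop_step 10 (by norm_num) (by decide),
              pvALoop_step (10 - 5) (by norm_num) (by decide),
              pvALoop_le (10 - 5 - 5) (by norm_num)]
          decide
      · -- n ∈ {1, 4, 7} : both return "-1"
        have : n = 1 ∨ n = 4 ∨ n = 7 := by omega
        rcases this with h | h | h <;> subst h
        · rw [pvALoop_le 1 (by norm_num)]; decide
        · rw [pvALoop_step 4 (by norm_num) (by decide), pvALoop_le (4 - 5) (by norm_num)]
          decide
        · rw [pvALoop_step 7 (by norm_num) (by decide), pvALoop_le (7 - 5) (by norm_num)]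
          decide
    · -- n % 3 = 2 : threes count 5 when n ≥ 5
      by_cases h5 : n ≥ 5
      · by_cases h8 : n ≥ 8
        · rw [pvALoop_step n (by omega) (by omega),
              pvALoop_div (n - 5) (by omega) (by omega)]
          have e1 : n - (n - 5) = 5 := by omega
          simp [h3, e1, hneg,
                (show ¬ (n - 5 : Int) < 0 by omega), (show ¬ (5 : Int) > n by omega)]
        · have h5' : n = 5 := by omega
          subst h5'
          rw [pvALoop_step 5 (by norm_num) (by decide), pvALoop_le (5 - 5) (by norm_num)]
          decide
      · have : n = 2 := by omega
        subst this
        rw [pvALoop_le 2 (by norm_num)]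
        decide
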